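-- pv_equiv track=rewrite | github.com/vijayara/PDC | file_name_image_decoding.py | sortQuadrants
-- ===== SOURCE A (Python) =====
-- maskUp = 1
--
-- maskDown = 2
--
-- maskLeft = 3
--
-- maskRight = 4
--
-- maskUpDown = 5
--
-- maskDownUp = 6
--
-- mask = (-1, -1)
--
-- def sortQuadrants(quadrantList, mask):
--     sortedList = []
--     size = len(quadrantList)
--
--     if not mask:
--         rest = size%12
--         padding = (rest!=0)*(12-rest)
--         size += padding
--
--         toKeep = [1, 4, 8, 11]
--         indices = [i for i in range(size) if i%12 in toKeep]
--     elif mask == maskUp or mask == maskLeft: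
--         rest = size%6
--         padding = (rest!=0)*(6-rest)
--         size += padding
--
--         toKeep = [0, 3, 4, 5]
--         indices = [i for i in range(size) if i%6 in toKeep]
--     elif mask == maskDown or mask == maskRight or mask == maskDownUp:
--         rest = size%6
--         padding = (rest!=0)*(6-rest)
--         size += padding
--
--         toKeep = [0, 1, 2, 4]
--         indices = [i for i in range(size) if i%6 in toKeep]
--         indices[::4], indices[1::4], indices[2::4], indices[3::4] = indices[1::4], indices[2::4], indices[3::4], indices[::4]
--     elif mask == maskUpDown:
--         rest = size%6
--         padding = (rest!=0)*(6-rest)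
--         size += padding
--
--         toKeep = [0, 2, 3, 4]
--         indices = [i for i in range(size) if i%6 in toKeep]
--         indices[::4], indices[1::4], indices[2::4], indices[3::4] = indices[::4], indices[2::4], indices[3::4], indices[1::4]
--
--     quadrantList += [quadrantList[-1]]*padding
--     sortedQuadrantList = [quadrantList[i] for i in indices]
--     return sortedQuadrantList
-- ===== SOURCE B (Python) =====
-- maskUp = 1
-- maskDown = 2
-- maskLeft = 3
-- maskRight = 4
-- maskUpDown = 5
-- maskDownUp = 6
--
-- def sortQuadrants(quadrantList, mask):
--     # choose the block period p and the four column start offsets, already in output order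
--     if not mask:
--         p, starts = 12, (1, 4, 8, 11)
--     elif mask == maskUp or mask == maskLeft:
--         p, starts = 6, (0, 3, 4, 5)
--     elif mask == maskDown or mask == maskRight or mask == maskDownUp:
--         p, starts = 6, (1, 2, 4, 0)
--     elif mask == maskUpDown:
--         p, starts = 6, (0, 3, 4, 2)
--     quadrantList += [quadrantList[-1]] * (-len(quadrantList) % p)
--     # slice the list into four p-strided columns and transpose them back into row order
--     columns = [quadrantList[s::p] for s in starts]
--     return [x for row in zip(*columns) for x in row]
-- ===== Notes on version B (the rewrite author's own statement) =====
-- stated objective: alternative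
-- what changed: B replaces A's filtered index comprehension over range(size) plus the post-hoc simultaneous slice-rotation with a transpose: it slices the padded list into four p-strided columns (quadrantList[s::p]) chosen in output order and re-interleaves them with zip, never building an index list at all.
-- outside the precondition, e.g. on sortQuadrants([], 1): A raises IndexError, B raises IndexError; on sortQuadrants([1], 7): A raises UnboundLocalError, B raises UnboundLocalError
import Mathlib
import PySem

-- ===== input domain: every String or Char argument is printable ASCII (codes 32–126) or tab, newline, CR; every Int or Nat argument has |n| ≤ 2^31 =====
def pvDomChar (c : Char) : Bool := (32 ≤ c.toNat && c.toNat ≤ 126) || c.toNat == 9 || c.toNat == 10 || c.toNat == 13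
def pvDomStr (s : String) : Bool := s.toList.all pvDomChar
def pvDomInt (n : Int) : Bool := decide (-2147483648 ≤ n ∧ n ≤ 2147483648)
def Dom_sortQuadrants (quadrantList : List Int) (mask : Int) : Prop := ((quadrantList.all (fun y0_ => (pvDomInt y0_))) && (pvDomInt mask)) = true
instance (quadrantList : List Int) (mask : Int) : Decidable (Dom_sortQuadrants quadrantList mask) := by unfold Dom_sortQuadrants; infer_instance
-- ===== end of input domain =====

-- B replaces A's range-filter index comprehension plus post-hoc slice-rotations by a transpose:
-- it slices the padded list into four p-strided columns and re-interleaves them with zip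
-- (alternative decomposition, same cost). Both Pythons mutate quadrantList in place (append the
-- padding); the equivalence proved here is about the RETURN value only.

-- ===== PORT A =====
-- hand port of the simultaneous slice assignment
-- `indices[::4],indices[1::4],indices[2::4],indices[3::4] = indices[1::4],indices[2::4],indices[3::4],indices[::4]`;
-- exact whenever the list length is a multiple of 4 (always the case where A uses it): each group [a,b,c,d] ↦ [b,c,d,a]
def pvRot246 (l : List Int) : List Int :=
  match l with
  | a :: b :: c :: d :: rest => b :: c :: d :: a :: pvRot246 rest
  | l => l

-- hand port of the maskUpDown slice assignment (new = old[::4], old[2::4], old[3::4], old[1::4]);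
-- exact for length a multiple of 4: each group [a,b,c,d] ↦ [a,c,d,b]
def pvRot5 (l : List Int) : List Int :=
  match l with
  | a :: b :: c :: d :: rest => a :: c :: d :: b :: pvRot5 rest
  | l => l

def sortQuadrants (quadrantList : List Int) (mask : Int) : List Int :=
  let size : Int := quadrantList.length
  -- the four branches compute (padding, indices); an unmatched mask raises UnboundLocalError in
  -- Python (excluded by Pre_), the port returns (0, []) there
  let pi : Int × List Int :=
    if mask = 0 then
      let rest := PySem.Int.mod size 12
      let padding := (if rest ≠ 0 then (1:Int) else 0) * (12 - rest)
      let size := size + padding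
      let toKeep : List Int := [1, 4, 8, 11]
      (padding, (PySem.List.pyRange 0 size 1).filter (fun i => PySem.Int.mod i 12 ∈ toKeep))
    else if mask = 1 ∨ mask = 3 then
      let rest := PySem.Int.mod size 6
      let padding := (if rest ≠ 0 then (1:Int) else 0) * (6 - rest)
      let size := size + padding
      let toKeep : List Int := [0, 3, 4, 5]
      (padding, (PySem.List.pyRange 0 size 1).filter (fun i => PySem.Int.mod i 6 ∈ toKeep))
    else if mask = 2 ∨ mask = 4 ∨ mask = 6 then
      let rest := PySem.Int.mod size 6
      let padding := (if rest ≠ 0 then (1:Int) else 0) * (6 - rest)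
      let size := size + padding
      let toKeep : List Int := [0, 1, 2, 4]
      (padding, pvRot246 ((PySem.List.pyRange 0 size 1).filter (fun i => PySem.Int.mod i 6 ∈ toKeep)))
    else if mask = 5 then
      let rest := PySem.Int.mod size 6
      let padding := (if rest ≠ 0 then (1:Int) else 0) * (6 - rest)
      let size := size + padding
      let toKeep : List Int := [0, 2, 3, 4]
      (padding, pvRot5 ((PySem.List.pyRange 0 size 1).filter (fun i => PySem.Int.mod i 6 ∈ toKeep)))
    else (0, [])
  -- quadrantList += [quadrantList[-1]]*padding ; quadrantList[-1] raises IndexError on [] (excluded by Pre_)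
  let q2 := quadrantList ++ List.replicate pi.1.toNat (quadrantList.getLast?.getD 0)
  pi.2.map (fun i => PySem.List.pyGetD q2 i 0)

-- ===== PORT B =====
-- port of `[x for row in zip(*columns) for x in row]` for the four columns: interleave four lists,
-- stopping at the shortest (zip semantics)
def pvZip4Flat (a b c d : List Int) : List Int :=
  match a, b, c, d with
  | x :: a, y :: b, z :: c, w :: d => x :: y :: z :: w :: pvZip4Flat a b c d
  | _, _, _, _ => []

def sortQuadrants_alt (quadrantList : List Int) (mask : Int) : List Int :=
  -- (p, the four column starts); an unmatched mask raises UnboundLocalError in Python (excluded by Pre_)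
  let ps : Int × Int × Int × Int × Int :=
    if mask = 0 then (12, 1, 4, 8, 11)
    else if mask = 1 ∨ mask = 3 then (6, 0, 3, 4, 5)
    else if mask = 2 ∨ mask = 4 ∨ mask = 6 then (6, 1, 2, 4, 0)
    else if mask = 5 then (6, 0, 3, 4, 2)
    else (1, 0, 0, 0, 0)
  let p := ps.1
  -- quadrantList += [quadrantList[-1]] * (-len(quadrantList) % p); [-1] on [] raises (excluded by Pre_)
  let q2 := quadrantList ++
    List.replicate (PySem.Int.mod (-(quadrantList.length : Int)) p).toNat (quadrantList.getLast?.getD 0)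
  -- columns = [quadrantList[s::p] for s in starts]
  let col := fun (s : Int) => (PySem.List.slice? q2 (some s) none p).getD []
  pvZip4Flat (col ps.2.1) (col ps.2.2.1) (col ps.2.2.2.1) (col ps.2.2.2.2)

-- ===== PRECONDITION & SPEC =====
-- Pre_ excludes exactly the inputs where the Python raises: the empty list (IndexError on
-- quadrantList[-1]) and masks outside {0,…,6} (UnboundLocalError: no branch assigns padding/indices).
def Pre_sortQuadrants (quadrantList : List Int) (mask : Int) : Prop :=
  quadrantList ≠ [] ∧ (mask = 0 ∨ (1 ≤ mask ∧ mask ≤ 6))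
instance (quadrantList : List Int) (mask : Int) : Decidable (Pre_sortQuadrants quadrantList mask) := by
  unfold Pre_sortQuadrants; infer_instance

def pvWitness_sortQuadrants : List Int × Int := ([1, 2, 3, 4, 5, 6, 7], 2)

def Spec_sortQuadrants (quadrantList : List Int) (mask : Int) (out : List Int) : Prop := out = sortQuadrants_alt quadrantList mask
instance (quadrantList : List Int) (mask : Int) (out : List Int) : Decidable (Spec_sortQuadrants quadrantList mask out) := by unfold Spec_sortQuadrants; infer_instance

-- ===== CLAIM (what is proved, stated in full; the proofs are below) =====
def Claim_equal_sortQuadrants : Prop := ∀ (quadrantList : List Int) (mask : Int), Dom_sortQuadrants quadrantList mask → Pre_sortQuadrants quadrantList mask → Spec_sortQuadrants quadrantList mask (sortQuadrants quadrantList mask)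

-- ===== LEMMAS AND PROOFS =====

-- [i for i in range(p*k) if i%p in toKeep] splits into per-block offset patterns
lemma idxp (p : Int) (hp : 0 < p) (base toKeep offs : List Int)
    (hbase : PySem.List.pyRange 0 p 1 = base)
    (hoff : base.filter (fun j => decide (j ∈ toKeep)) = offs) (k : Nat) :
    (PySem.List.pyRange 0 (p * (k:Int)) 1).filter (fun i => decide (PySem.Int.mod i p ∈ toKeep)) =
    (PySem.List.pyRange 0 (k:Int) 1).flatMap (fun b => offs.map (fun o => p * b + o)) := by
  induction k with
  | zero => simp [PySem.List.pyRange_one_eq_nil]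
  | succ k ih =>
    have h1 : (p * ((k+1:Nat):Int)) = p*(k:Int) + p := by push_cast; ring
    have h2 : ((k+1:Nat):Int) = (k:Int) + 1 := by push_cast; ring
    rw [h1, h2, PySem.List.pyRange_one_append 0 (p*(k:Int)) (p*(k:Int)+p) (by positivity) (by omega),
        List.filter_append, ih, PySem.List.pyRange_one_succ_right (by positivity), List.flatMap_append]
    congr 1
    have hshift : PySem.List.pyRange (p*(k:Int)) (p*(k:Int)+p) 1 = base.map (fun j => p*(k:Int) + j) := by
      rw [← hbase, PySem.List.pyRange_one, PySem.List.pyRange_one, List.map_map]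
      have h3 : (p*(k:Int)+p - p*(k:Int)).toNat = (p - 0).toNat := by omega
      rw [h3]
      simp [Function.comp]
    rw [hshift, List.filter_map]
    have hcong : List.filter ((fun i => decide (PySem.Int.mod i p ∈ toKeep)) ∘ (fun j => p*(k:Int) + j)) base
        = List.filter (fun j => decide (j ∈ toKeep)) base := by
      apply List.filter_congr
      intro j hj
      have hjb : 0 ≤ j ∧ j < p := by
        rw [← hbase] at hj
        exact (PySem.List.mem_pyRange_one.mp hj).imp id id
      simp only [Function.comp_apply]
      congr 1
      rw [PySem.Int.mod_eq_emod_of_pos hp, Int.add_comm, Int.add_mul_emod_self_left,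
          Int.emod_eq_of_lt hjb.1 hjb.2]
    rw [hcong, hoff]
    simp

lemma pvRot246_flatMap (f0 f1 f2 f3 : Int → Int) (l : List Int) :
    pvRot246 (l.flatMap (fun b => [f0 b, f1 b, f2 b, f3 b])) =
    l.flatMap (fun b => [f1 b, f2 b, f3 b, f0 b]) := by
  induction l with
  | nil => rfl
  | cons b l ih => simp [pvRot246, ih]

lemma pvRot5_flatMap (f0 f1 f2 f3 : Int → Int) (l : List Int) :
    pvRot5 (l.flatMap (fun b => [f0 b, f1 b, f2 b, f3 b])) =
    l.flatMap (fun b => [f0 b, f2 b, f3 b, f1 b]) := by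
  induction l with
  | nil => rfl
  | cons b l ih => simp [pvRot5, ih]

-- the four index patterns, one per branch family
lemma idx0 (k : Nat) :
    (PySem.List.pyRange 0 (12 * (k:Int)) 1).filter (fun i => decide (PySem.Int.mod i 12 ∈ ([1,4,8,11] : List Int))) =
    (PySem.List.pyRange 0 (k:Int) 1).flatMap (fun b => ([1,4,8,11] : List Int).map (fun o => 12 * b + o)) :=
  idxp 12 (by norm_num) [0,1,2,3,4,5,6,7,8,9,10,11] [1,4,8,11] [1,4,8,11] (by decide) (by decide) k

lemma idx13 (k : Nat) :
    (PySem.List.pyRange 0 (6 * (k:Int)) 1).filter (fun i => decide (PySem.Int.mod i 6 ∈ ([0,3,4,5] : List Int))) =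
    (PySem.List.pyRange 0 (k:Int) 1).flatMap (fun b => ([0,3,4,5] : List Int).map (fun o => 6 * b + o)) :=
  idxp 6 (by norm_num) [0,1,2,3,4,5] [0,3,4,5] [0,3,4,5] (by decide) (by decide) k

lemma idx246 (k : Nat) :
    pvRot246 ((PySem.List.pyRange 0 (6 * (k:Int)) 1).filter (fun i => decide (PySem.Int.mod i 6 ∈ ([0,1,2,4] : List Int)))) =
    (PySem.List.pyRange 0 (k:Int) 1).flatMap (fun b => [6*b+1, 6*b+2, 6*b+4, 6*b+0]) := by
  rw [idxp 6 (by norm_num) [0,1,2,3,4,5] [0,1,2,4] [0,1,2,4] (by decide) (by decide) k]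
  have h : ∀ b : Int, ([0,1,2,4] : List Int).map (fun o => 6*b+o) = [(fun b => 6*b+0) b, (fun b => 6*b+1) b, (fun b => 6*b+2) b, (fun b => 6*b+4) b] := by
    intro b; simp
  simp only [h]
  rw [pvRot246_flatMap]

lemma idx5 (k : Nat) :
    pvRot5 ((PySem.List.pyRange 0 (6 * (k:Int)) 1).filter (fun i => decide (PySem.Int.mod i 6 ∈ ([0,2,3,4] : List Int)))) =
    (PySem.List.pyRange 0 (k:Int) 1).flatMap (fun b => [6*b+0, 6*b+3, 6*b+4, 6*b+2]) := by
  rw [idxp 6 (by norm_num) [0,1,2,3,4,5] [0,2,3,4] [0,2,3,4] (by decide) (by decide) k]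
  have h : ∀ b : Int, ([0,2,3,4] : List Int).map (fun o => 6*b+o) = [(fun b => 6*b+0) b, (fun b => 6*b+2) b, (fun b => 6*b+3) b, (fun b => 6*b+4) b] := by
    intro b; simp
  simp only [h]
  rw [pvRot5_flatMap]

-- the p-strided column q2[s::p] on a list of length p*k is the per-block gather at offset s
lemma slice?_col (q2 : List Int) (p s : Int) (k : Nat) (hp : 0 < p) (hs : 0 ≤ s) (hsp : s < p)
    (hk : 0 < k) (hlen : (q2.length : Int) = p * k) :
    (PySem.List.slice? q2 (some s) none p).getD [] =
    (List.range k).map (fun (b : Nat) => PySem.List.pyGetD q2 (p * (b:Int) + s) 0) := by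
  unfold PySem.List.slice? PySem.List.sliceIndices
  have hple : p ≤ (q2.length : Int) := by nlinarith [Int.natCast_pos.mpr hk]
  simp only [if_neg (by omega : ¬ p = 0), if_neg (by omega : ¬ p < 0), if_neg (by omega : ¬ s < 0),
    if_pos hp]
  have hmin : min s (q2.length : Int) = s := by omega
  rw [hmin]
  have hdiv : ((q2.length:Int) - s + p - 1) / p = k := by
    have h1 : (q2.length:Int) - s + p - 1 = (p - 1 - s) + k * p := by rw [hlen]; ring
    rw [h1, Int.add_mul_ediv_right _ _ (by omega : p ≠ 0),
        Int.ediv_eq_zero_of_lt (by omega) (by omega)]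
    omega
  rw [if_pos (by omega : s < (q2.length:Int)), hdiv, Int.toNat_natCast, Option.getD_some]
  have hmm : ∀ b ∈ List.range k, q2[(s + p * (b:Int)).toNat]? =
      some (PySem.List.pyGetD q2 (p * (b:Int) + s) 0) := by
    intro b hb
    rw [List.mem_range] at hb
    have hnn : (0:Int) ≤ s + p * (b:Int) := by positivity
    have hidx : (s + p * (b:Int)).toNat < q2.length := by
      have hb' : (b:Int) + 1 ≤ (k:Int) := by exact_mod_cast hb
      have : s + p * (b:Int) < p * k := by nlinarith
      omega
    rw [List.getElem?_eq_getElem hidx]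
    congr 1
    have heq : p * (b:Int) + s = (((s + p * (b:Int)).toNat : Nat) : Int) := by omega
    rw [heq, PySem.List.pyGetD_natCast, List.getD_eq_getElem _ _ hidx]
  rw [List.filterMap_congr hmm]
  have hsf : (fun b : Nat => some (PySem.List.pyGetD q2 (p * (b:Int) + s) 0)) =
      some ∘ (fun b : Nat => PySem.List.pyGetD q2 (p * (b:Int) + s) 0) := rfl
  rw [hsf, List.filterMap_eq_map]

-- interleaving four equally-shaped mapped columns is the per-block flatMap
lemma zip4flat_map (f0 f1 f2 f3 : Nat → Int) (l : List Nat) :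
    pvZip4Flat (l.map f0) (l.map f1) (l.map f2) (l.map f3) =
    l.flatMap (fun b => [f0 b, f1 b, f2 b, f3 b]) := by
  induction l with
  | nil => rfl
  | cons b l ih => simp [pvZip4Flat, ih]

lemma pyRange_flatMap (k : Nat) (f : Int → List Int) :
    (PySem.List.pyRange 0 (k:Int) 1).flatMap f = (List.range k).flatMap (fun (b : Nat) => f (b:Int)) := by
  rw [PySem.List.pyRange_one]
  simp [List.flatMap_map]

lemma sortQuadrants_case0 (q : List Int) (hq : q ≠ []) : sortQuadrants q 0 = sortQuadrants_alt q 0 := by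
  simp only [sortQuadrants, sortQuadrants_alt, Int.reduceEq, reduceIte, true_or, or_true,
    false_or, or_false, if_true, if_false]
  set n := q.length with hn
  have hpadA : (if ¬PySem.Int.mod (n:Int) 12 = 0 then (1:Int) else 0) * (12 - PySem.Int.mod (n:Int) 12) = (((12 - n % 12) % 12 : Nat) : Int) := by
    rw [PySem.Int.mod_eq_emod_of_pos (by norm_num)]
    split_ifs with h <;> omega
  have hpadB : PySem.Int.mod (-(n:Int)) 12 = (((12 - n % 12) % 12 : Nat) : Int) := by
    rw [PySem.Int.mod_eq_emod_of_pos (by norm_num)]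
    omega
  rw [hpadA, hpadB]
  set padN := (12 - n % 12) % 12 with hpadN
  set k := (n + padN)/12 with hk
  have hm : n + padN = 12*k := by omega
  have hkpos : 0 < k := by
    have : 0 < n := by simpa [hn] using List.length_pos_iff.mpr hq
    omega
  set q2 := q ++ List.replicate ((padN:Int)).toNat (q.getLast?.getD 0) with hq2
  have hlen : (q2.length : Int) = 12 * (k:Int) := by
    rw [hq2]; simp only [List.length_append, List.length_replicate, Int.toNat_natCast, ← hn]
    push_cast; omega
  rw [slice?_col q2 12 1 k (by norm_num) (by norm_num) (by norm_num) hkpos hlen,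
      slice?_col q2 12 4 k (by norm_num) (by norm_num) (by norm_num) hkpos hlen,
      slice?_col q2 12 8 k (by norm_num) (by norm_num) (by norm_num) hkpos hlen,
      slice?_col q2 12 11 k (by norm_num) (by norm_num) (by norm_num) hkpos hlen,
      zip4flat_map]
  have hb : ((n:Int) + (padN:Int)) = 12 * (k:Int) := by omega
  rw [hb, idx0 k, List.map_flatMap, pyRange_flatMap]
  simp

lemma sortQuadrants_case13 (q : List Int) (hq : q ≠ []) (m : Int) (hm13 : m = 1 ∨ m = 3) :
    sortQuadrants q m = sortQuadrants_alt q m := by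
  have hne0 : ¬ m = 0 := by rcases hm13 with rfl | rfl <;> norm_num
  simp only [sortQuadrants, sortQuadrants_alt, if_neg hne0, if_pos hm13]
  set n := q.length with hn
  have hpadA : (if ¬PySem.Int.mod (n:Int) 6 = 0 then (1:Int) else 0) * (6 - PySem.Int.mod (n:Int) 6) = (((6 - n % 6) % 6 : Nat) : Int) := by
    rw [PySem.Int.mod_eq_emod_of_pos (by norm_num)]
    split_ifs with h <;> omega
  have hpadB : PySem.Int.mod (-(n:Int)) 6 = (((6 - n % 6) % 6 : Nat) : Int) := by
    rw [PySem.Int.mod_eq_emod_of_pos (by norm_num)]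
    omega
  rw [hpadA, hpadB]
  set padN := (6 - n % 6) % 6 with hpadN
  set k := (n + padN)/6 with hk
  have hm : n + padN = 6*k := by omega
  have hkpos : 0 < k := by
    have : 0 < n := by simpa [hn] using List.length_pos_iff.mpr hq
    omega
  set q2 := q ++ List.replicate ((padN:Int)).toNat (q.getLast?.getD 0) with hq2
  have hlen : (q2.length : Int) = 6 * (k:Int) := by
    rw [hq2]; simp only [List.length_append, List.length_replicate, Int.toNat_natCast, ← hn]
    push_cast; omega
  rw [slice?_col q2 6 0 k (by norm_num) (by norm_num) (by norm_num) hkpos hlen,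
      slice?_col q2 6 3 k (by norm_num) (by norm_num) (by norm_num) hkpos hlen,
      slice?_col q2 6 4 k (by norm_num) (by norm_num) (by norm_num) hkpos hlen,
      slice?_col q2 6 5 k (by norm_num) (by norm_num) (by norm_num) hkpos hlen,
      zip4flat_map]
  have hb : ((n:Int) + (padN:Int)) = 6 * (k:Int) := by omega
  rw [hb, idx13 k, List.map_flatMap, pyRange_flatMap]
  simp

lemma sortQuadrants_case246 (q : List Int) (hq : q ≠ []) (m : Int) (hm246 : m = 2 ∨ m = 4 ∨ m = 6) :
    sortQuadrants q m = sortQuadrants_alt q m := by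
  have hne0 : ¬ m = 0 := by rcases hm246 with rfl | rfl | rfl <;> norm_num
  have hne13 : ¬ (m = 1 ∨ m = 3) := by rcases hm246 with rfl | rfl | rfl <;> norm_num
  simp only [sortQuadrants, sortQuadrants_alt, if_neg hne0, if_neg hne13, if_pos hm246]
  set n := q.length with hn
  have hpadA : (if ¬PySem.Int.mod (n:Int) 6 = 0 then (1:Int) else 0) * (6 - PySem.Int.mod (n:Int) 6) = (((6 - n % 6) % 6 : Nat) : Int) := by
    rw [PySem.Int.mod_eq_emod_of_pos (by norm_num)]
    split_ifs with h <;> omega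
  have hpadB : PySem.Int.mod (-(n:Int)) 6 = (((6 - n % 6) % 6 : Nat) : Int) := by
    rw [PySem.Int.mod_eq_emod_of_pos (by norm_num)]
    omega
  rw [hpadA, hpadB]
  set padN := (6 - n % 6) % 6 with hpadN
  set k := (n + padN)/6 with hk
  have hm : n + padN = 6*k := by omega
  have hkpos : 0 < k := by
    have : 0 < n := by simpa [hn] using List.length_pos_iff.mpr hq
    omega
  set q2 := q ++ List.replicate ((padN:Int)).toNat (q.getLast?.getD 0) with hq2
  have hlen : (q2.length : Int) = 6 * (k:Int) := by
    rw [hq2]; simp only [List.length_append, List.length_replicate, Int.toNat_natCast, ← hn]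
    push_cast; omega
  rw [slice?_col q2 6 1 k (by norm_num) (by norm_num) (by norm_num) hkpos hlen,
      slice?_col q2 6 2 k (by norm_num) (by norm_num) (by norm_num) hkpos hlen,
      slice?_col q2 6 4 k (by norm_num) (by norm_num) (by norm_num) hkpos hlen,
      slice?_col q2 6 0 k (by norm_num) (by norm_num) (by norm_num) hkpos hlen,
      zip4flat_map]
  have hb : ((n:Int) + (padN:Int)) = 6 * (k:Int) := by omega
  rw [hb, idx246 k, List.map_flatMap, pyRange_flatMap]
  simp

lemma sortQuadrants_case5 (q : List Int) (hq : q ≠ []) : sortQuadrants q 5 = sortQuadrants_alt q 5 := by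
  simp only [sortQuadrants, sortQuadrants_alt, Int.reduceEq, reduceIte, true_or, or_true,
    false_or, or_false, if_true, if_false]
  set n := q.length with hn
  have hpadA : (if ¬PySem.Int.mod (n:Int) 6 = 0 then (1:Int) else 0) * (6 - PySem.Int.mod (n:Int) 6) = (((6 - n % 6) % 6 : Nat) : Int) := by
    rw [PySem.Int.mod_eq_emod_of_pos (by norm_num)]
    split_ifs with h <;> omega
  have hpadB : PySem.Int.mod (-(n:Int)) 6 = (((6 - n % 6) % 6 : Nat) : Int) := by
    rw [PySem.Int.mod_eq_emod_of_pos (by norm_num)]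
    omega
  rw [hpadA, hpadB]
  set padN := (6 - n % 6) % 6 with hpadN
  set k := (n + padN)/6 with hk
  have hm : n + padN = 6*k := by omega
  have hkpos : 0 < k := by
    have : 0 < n := by simpa [hn] using List.length_pos_iff.mpr hq
    omega
  set q2 := q ++ List.replicate ((padN:Int)).toNat (q.getLast?.getD 0) with hq2
  have hlen : (q2.length : Int) = 6 * (k:Int) := by
    rw [hq2]; simp only [List.length_append, List.length_replicate, Int.toNat_natCast, ← hn]
    push_cast; omega
  rw [slice?_col q2 6 0 k (by norm_num) (by norm_num) (by norm_num) hkpos hlen,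
      slice?_col q2 6 3 k (by norm_num) (by norm_num) (by norm_num) hkpos hlen,
      slice?_col q2 6 4 k (by norm_num) (by norm_num) (by norm_num) hkpos hlen,
      slice?_col q2 6 2 k (by norm_num) (by norm_num) (by norm_num) hkpos hlen,
      zip4flat_map]
  have hb : ((n:Int) + (padN:Int)) = 6 * (k:Int) := by omega
  rw [hb, idx5 k, List.map_flatMap, pyRange_flatMap]
  simp

-- ===== VERDICT (by name: the statement is the Claim_ definition above) =====
theorem sortQuadrants_spec : Claim_equal_sortQuadrants := by
  intro q mask _hdom hpre
  obtain ⟨hq, hmask⟩ := hpre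
  simp only [Spec_sortQuadrants]
  have h7 : mask = 0 ∨ mask = 1 ∨ mask = 2 ∨ mask = 3 ∨ mask = 4 ∨ mask = 5 ∨ mask = 6 := by omega
  rcases h7 with rfl | rfl | rfl | rfl | rfl | rfl | rfl
  · exact sortQuadrants_case0 q hq
  · exact sortQuadrants_case13 q hq 1 (Or.inl rfl)
  · exact sortQuadrants_case246 q hq 2 (Or.inl rfl)
  · exact sortQuadrants_case13 q hq 3 (Or.inr rfl)
  · exact sortQuadrants_case246 q hq 4 (Or.inr (Or.inl rfl))
  · exact sortQuadrants_case5 q hq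
  · exact sortQuadrants_case246 q hq 6 (Or.inr (Or.inr rfl))
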